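-- pv_equiv track=rewrite | github.com/rlatmddms/baekjoon_codes | Python3/프로그래머스/2/60057. 문자열 압축/문자열 압축.py | string_zip
-- ===== SOURCE A (Python) =====
-- def string_zip(s,n):
--     answer = ""
--     cutting_s = []
--     tmp = ""
--     for i,c in enumerate(s,1):
--         tmp += c
--         if i % n == 0:
--             cutting_s.append(tmp)
--             tmp = ""
--     if tmp:
--         cutting_s.append(tmp)
--         tmp = ""
--     chain = 1
--     for c in cutting_s:
--         if tmp == c:
--             chain+=1
--         else:
--             if chain == 1:
--                 answer += tmp
--             else:
--                 answer += str(chain) + tmp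
--             chain = 1
--             tmp = c
--     if chain == 1:
--         answer += tmp
--     else:
--         answer += str(chain) + tmp
--     return len(answer)
-- ===== SOURCE B (Python) =====
-- def string_zip(s, n):
--     # chunking kept as in the task statement (enumerate + i % n)
--     chunks = []
--     tmp = ""
--     for i, c in enumerate(s, 1):
--         tmp += c
--         if i % n == 0:
--             chunks.append(tmp)
--             tmp = ""
--     if tmp:
--         chunks.append(tmp)
--     # run-length: count each run with two indices, sum lengths arithmetically,
--     # never building the compressed string
--     total = 0
--     i = 0
--     while i < len(chunks):
--         j = i
--         while j < len(chunks) and chunks[j] == chunks[i]: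
--             j += 1
--         cnt = j - i
--         total += len(chunks[i]) if cnt == 1 else len(str(cnt)) + len(chunks[i])
--         i = j
--     return total
-- ===== Notes on version B (the rewrite author's own statement) =====
-- stated objective: alternative
-- what changed: B keeps the chunk-splitting loop but replaces A's look-behind string building (answer/chain/tmp state machine producing the compressed string, then len) with a two-index run scan over the chunk list that sums the lengths arithmetically and never constructs the compressed string.
import Mathlib
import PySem

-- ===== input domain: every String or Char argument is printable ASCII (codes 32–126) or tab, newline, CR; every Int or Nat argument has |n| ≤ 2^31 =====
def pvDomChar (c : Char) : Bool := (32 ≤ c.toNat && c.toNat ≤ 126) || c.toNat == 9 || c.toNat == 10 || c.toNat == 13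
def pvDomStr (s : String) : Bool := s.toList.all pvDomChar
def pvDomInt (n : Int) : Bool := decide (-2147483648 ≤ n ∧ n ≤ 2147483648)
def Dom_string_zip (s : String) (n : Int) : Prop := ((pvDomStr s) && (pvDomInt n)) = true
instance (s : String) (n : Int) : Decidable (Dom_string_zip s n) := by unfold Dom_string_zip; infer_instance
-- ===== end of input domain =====

-- B replaces A's look-behind compressed-string building with an arithmetic run-length sum over the same chunk list (alternative decomposition, same cost).


-- ===== PORT A =====
-- chunking loop body, shared verbatim by both Pythons: tmp += c; if i % n == 0: append, reset
def pvChunkStep (n : Int) (st : List (List Char) × List Char) (ic : Int × Char) :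
    List (List Char) × List Char :=
  let tmp := st.2 ++ [ic.2]
  if PySem.Int.mod ic.1 n == 0 then (st.1 ++ [tmp], []) else (st.1, tmp)

-- A's RLE loop body over state (answer, chain, tmp)
def pvAStep (st : List Char × Int × List Char) (c : List Char) : List Char × Int × List Char :=
  if st.2.2 == c then (st.1, st.2.1 + 1, st.2.2)
  else (st.1 ++ (if st.2.1 == 1 then st.2.2 else (PySem.Int.toStr st.2.1).toList ++ st.2.2), 1, c)

def string_zip (s : String) (n : Int) : Int :=
  let p := (PySem.List.enumerate s.toList 1).foldl (pvChunkStep n) ([], [])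
  let cutting := if p.2 == [] then p.1 else p.1 ++ [p.2]
  let q := cutting.foldl pvAStep ([], 1, [])
  let answer := q.1 ++ (if q.2.1 == 1 then q.2.2 else (PySem.Int.toStr q.2.1).toList ++ q.2.2)
  (answer.length : Int)

-- ===== PORT B =====
-- B's while loop: count the leading run (the inner j-scan), add its length arithmetically, continue after the run
def pvRunSum : List (List Char) → Int
  | [] => 0
  | c :: rest =>
    let k := (rest.takeWhile (fun d => d == c)).length
    let cnt : Int := (k : Int) + 1
    (if cnt == 1 then (c.length : Int) else ((PySem.Int.toStr cnt).toList.length : Int) + c.length)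
      + pvRunSum (rest.drop k)
termination_by l => l.length
decreasing_by simp

def string_zip_alt (s : String) (n : Int) : Int :=
  let p := (PySem.List.enumerate s.toList 1).foldl (pvChunkStep n) ([], [])
  let chunks := if p.2 == [] then p.1 else p.1 ++ [p.2]
  pvRunSum chunks

-- ===== PRECONDITION & SPEC =====
-- Pre_ excludes n = 0 with nonempty s: there 'i % n' raises ZeroDivisionError in both Pythons.
def Pre_string_zip (s : String) (n : Int) : Prop := s = "" ∨ n ≠ 0
instance (s : String) (n : Int) : Decidable (Pre_string_zip s n) := by unfold Pre_string_zip; infer_instance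
def pvWitness_string_zip : String × Int := ("aabbaccc", 2)

def Spec_string_zip (s : String) (n : Int) (out : Int) : Prop := out = string_zip_alt s n
instance (s : String) (n : Int) (out : Int) : Decidable (Spec_string_zip s n out) := by unfold Spec_string_zip; infer_instance

-- ===== CLAIM (what is proved, stated in full; the proofs are below) =====
def Claim_equal_string_zip : Prop := ∀ (s : String) (n : Int), Dom_string_zip s n → Pre_string_zip s n → Spec_string_zip s n (string_zip s n)

-- ===== LEMMAS AND PROOFS =====

-- flush of A's pending (chain, tmp)
def pvFlush (chain : Int) (tmp : List Char) : List Char :=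
  if chain == 1 then tmp else (PySem.Int.toStr chain).toList ++ tmp

-- abstract form of A's RLE loop + final flush, returning only the produced length
def pvA2 : List (List Char) → Int → List Char → Int
  | [], chain, tmp => ((pvFlush chain tmp).length : Int)
  | c :: cs, chain, tmp =>
    if tmp == c then pvA2 cs (chain + 1) tmp
    else ((pvFlush chain tmp).length : Int) + pvA2 cs 1 c

theorem pvL1 (cs : List (List Char)) : ∀ (ans : List Char) (chain : Int) (tmp : List Char),
    (((cs.foldl pvAStep (ans, chain, tmp)).1 ++
        pvFlush (cs.foldl pvAStep (ans, chain, tmp)).2.1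
          (cs.foldl pvAStep (ans, chain, tmp)).2.2).length : Int)
      = (ans.length : Int) + pvA2 cs chain tmp := by
  induction cs with
  | nil =>
    intro ans chain tmp
    simp [pvA2, List.length_append]
  | cons c cs ih =>
    intro ans chain tmp
    by_cases h : tmp == c
    · simp only [List.foldl_cons, pvAStep, h, if_pos]
      rw [ih, pvA2]
      simp [h]
    · simp only [List.foldl_cons, pvAStep, h, if_neg, Bool.false_eq_true, not_false_iff]
      rw [ih, pvA2]
      simp only [h, Bool.false_eq_true, if_false, List.length_append, pvFlush]
      push_cast
      ring

theorem pvL2 (cs : List (List Char)) : ∀ (c : List Char) (chain : Int),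
    pvA2 cs chain c
      = ((pvFlush (chain + ((cs.takeWhile (fun d => d == c)).length : Int)) c).length : Int)
        + pvRunSum (cs.drop (cs.takeWhile (fun d => d == c)).length) := by
  induction cs with
  | nil =>
    intro c chain
    simp only [pvA2, List.takeWhile_nil, List.length_nil, Nat.cast_zero, add_zero,
      List.drop_nil]
    rw [pvRunSum]
    simp
  | cons c' cs ih =>
    intro c chain
    by_cases h : c' = c
    · subst h
      rw [pvA2]
      simp only [beq_self_eq_true, if_true, List.takeWhile_cons, List.length_cons,
        List.drop_succ_cons]
      rw [ih]
      congr 2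
      all_goals (push_cast; ring_nf)
    · have hb : (c == c') = false := by
        simp only [beq_eq_false_iff_ne, ne_eq]
        exact fun he => h he.symm
      have hb' : (c' == c) = false := by
        simp only [beq_eq_false_iff_ne, ne_eq]
        exact h
      rw [pvA2]
      simp only [hb, Bool.false_eq_true, if_false]
      rw [List.takeWhile_cons, hb']
      simp only [Bool.false_eq_true, if_false, List.length_nil, Nat.cast_zero, add_zero,
        List.drop_zero]
      congr 1
      rw [pvRunSum.eq_2, ih c' 1]
      congr 1
      have harg : (1 : Int) + ((cs.takeWhile (fun d => d == c')).length : Int)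
          = ((cs.takeWhile (fun d => d == c')).length : Int) + 1 := by ring
      rw [harg]
      by_cases h1 : ((cs.takeWhile (fun d => d == c')).length : Int) + 1 = 1
      · simp [pvFlush, h1]
      · simp [pvFlush, h1, List.length_append]

theorem pvL3 (cs : List (List Char)) (c : List Char) : pvRunSum (c :: cs) = pvA2 cs 1 c := by
  rw [pvL2, pvRunSum.eq_2]
  congr 1
  have harg : (1 : Int) + ((cs.takeWhile (fun d => d == c)).length : Int)
      = ((cs.takeWhile (fun d => d == c)).length : Int) + 1 := by ring
  rw [harg]
  by_cases h1 : ((cs.takeWhile (fun d => d == c)).length : Int) + 1 = 1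
  · simp [pvFlush, h1]
  · simp [pvFlush, h1, List.length_append]

theorem pvL4 (n : Int) (l : List (Int × Char)) : ∀ (st : List (List Char) × List Char),
    (∀ x ∈ st.1, x ≠ []) → ∀ x ∈ (l.foldl (pvChunkStep n) st).1, x ≠ [] := by
  induction l with
  | nil => intro st h; exact h
  | cons ic l ih =>
    intro st h
    rw [List.foldl_cons]
    apply ih
    unfold pvChunkStep
    by_cases hm : PySem.Int.mod ic.1 n == 0
    · simp only [hm, if_true]
      intro x hx
      rcases List.mem_append.mp hx with hx | hx
      · exact h x hx
      · simp only [List.mem_singleton] at hx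
        subst hx
        simp
    · simp only [hm, Bool.false_eq_true, if_false]
      exact h

theorem pvL5 (chunks : List (List Char)) (hne : ∀ x ∈ chunks, x ≠ []) :
    (((chunks.foldl pvAStep ([], 1, [])).1 ++
        (if (chunks.foldl pvAStep ([], 1, [])).2.1 == 1 then (chunks.foldl pvAStep ([], 1, [])).2.2
         else (PySem.Int.toStr (chunks.foldl pvAStep ([], 1, [])).2.1).toList ++
              (chunks.foldl pvAStep ([], 1, [])).2.2)).length : Int)
      = pvRunSum chunks := by
  have h1 := pvL1 chunks [] 1 []
  simp only [pvFlush] at h1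
  rw [h1]
  cases chunks with
  | nil =>
    rw [pvRunSum]
    simp [pvA2, pvFlush]
  | cons h t =>
    have hh : h ≠ [] := hne h (by simp)
    have hb : (([] : List Char) == h) = false := by
      simp only [beq_eq_false_iff_ne, ne_eq]
      exact fun he => hh he.symm
    rw [pvA2]
    simp only [hb, Bool.false_eq_true, if_false, pvFlush]
    rw [pvL3]
    simp

-- ===== VERDICT (by name: the statement is the Claim_ definition above) =====
theorem string_zip_spec : Claim_equal_string_zip := by
  intro s n _ _
  have hne : ∀ x ∈ (if ((PySem.List.enumerate s.toList 1).foldl (pvChunkStep n)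
        (([], []) : List (List Char) × List Char)).2 == []
      then ((PySem.List.enumerate s.toList 1).foldl (pvChunkStep n)
        (([], []) : List (List Char) × List Char)).1
      else ((PySem.List.enumerate s.toList 1).foldl (pvChunkStep n)
        (([], []) : List (List Char) × List Char)).1 ++
          [((PySem.List.enumerate s.toList 1).foldl (pvChunkStep n)
            (([], []) : List (List Char) × List Char)).2]), x ≠ [] := by
    intro x hx
    split at hx
    · exact pvL4 n _ _ (by simp) x hx
    · rename_i hne2
      rcases List.mem_append.mp hx with hx | hx
      · exact pvL4 n _ _ (by simp) x hx
      · simp only [List.mem_singleton] at hx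
        subst hx
        simpa using hne2
  exact pvL5 _ hne
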